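-- pv_equiv track=rewrite | github.com/tbohne/AoC | 2015/day1/d1.py | solve
-- ===== SOURCE A (Python) =====
-- from typing import Tuple
--
-- def solve(data: str) -> Tuple[int, int]:
--     floor = 0
--     basement = -1
--     for pos, direction in enumerate(data, 1):
--         if direction == "(":
--             floor += 1
--         elif direction == ")":
--             floor -= 1
--         if floor == -1 and basement == -1:
--             basement = pos
--     return floor, basement
-- ===== SOURCE B (Python) =====
-- def solve(data):
--     floor = data.count("(") - data.count(")")
--     basement = -1
--     balance = 0
--     for pos, ch in enumerate(data, 1):
--         if ch == "(":
--             balance += 1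
--         elif ch == ")":
--             balance -= 1
--         if balance == -1:
--             basement = pos
--             break
--     return floor, basement
-- ===== Notes on version B (the rewrite author's own statement) =====
-- stated objective: simpler
-- what changed: Final floor is computed in closed form via two str.count calls instead of being accumulated, and the basement position comes from a separate early-terminating scan that breaks at the first -1 balance instead of carrying a sentinel flag through the whole string.
import Mathlib
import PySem

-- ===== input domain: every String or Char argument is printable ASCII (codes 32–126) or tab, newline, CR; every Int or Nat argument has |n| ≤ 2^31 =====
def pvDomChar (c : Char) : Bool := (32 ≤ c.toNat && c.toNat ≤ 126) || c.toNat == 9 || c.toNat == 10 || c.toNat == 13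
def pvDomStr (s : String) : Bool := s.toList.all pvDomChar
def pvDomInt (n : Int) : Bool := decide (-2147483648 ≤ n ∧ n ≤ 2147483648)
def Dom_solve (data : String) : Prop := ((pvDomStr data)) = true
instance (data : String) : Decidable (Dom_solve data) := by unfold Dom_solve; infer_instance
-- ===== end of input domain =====

-- B computes the final floor in closed form from two character counts and finds the first
-- basement position with a separate early-terminating scan (objective: simpler).

-- ===== PORT A =====
-- single pass: floor accumulator, basement sentinel, 1-based position
def solveAux : List Char → Int → Int → Int → Int × Int
  | [], floor, basement, _ => (floor, basement)
  | c :: rest, floor, basement, pos =>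
    let floor' := if c = '(' then floor + 1 else if c = ')' then floor - 1 else floor
    let basement' := if floor' = -1 ∧ basement = -1 then pos else basement
    solveAux rest floor' basement' (pos + 1)

def solve (data : String) : Int × Int :=
  solveAux data.toList 0 (-1) 1

-- ===== PORT B =====
-- early-terminating scan for the first position with balance -1
def basementAux : List Char → Int → Int → Int
  | [], _, _ => -1
  | c :: rest, bal, pos =>
    let bal' := if c = '(' then bal + 1 else if c = ')' then bal - 1 else bal
    if bal' = -1 then pos else basementAux rest bal' (pos + 1)

def solve_alt (data : String) : Int × Int :=
  ((PySem.Str.count data "(" : Int) - (PySem.Str.count data ")" : Int),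
   basementAux data.toList 0 1)

-- ===== PRECONDITION & SPEC =====
def Spec_solve (data : String) (out : Int × Int) : Prop := out = solve_alt data
instance (data : String) (out : Int × Int) : Decidable (Spec_solve data out) := by unfold Spec_solve; infer_instance

-- ===== CLAIM (what is proved, stated in full; the proofs are below) =====
def Claim_equal_solve : Prop := ∀ (data : String), Dom_solve data → Spec_solve data (solve data)

-- ===== LEMMAS AND PROOFS =====

theorem solveAux_cons (c : Char) (t : List Char) (f b p : Int) :
    solveAux (c :: t) f b p =
      solveAux t (if c = '(' then f + 1 else if c = ')' then f - 1 else f)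
        (if (if c = '(' then f + 1 else if c = ')' then f - 1 else f) = -1 ∧ b = -1 then p else b)
        (p + 1) := rfl

theorem basementAux_cons (c : Char) (t : List Char) (bal p : Int) :
    basementAux (c :: t) bal p =
      (if (if c = '(' then bal + 1 else if c = ')' then bal - 1 else bal) = -1 then p
       else basementAux t (if c = '(' then bal + 1 else if c = ')' then bal - 1 else bal) (p + 1)) := rfl

theorem count_go_singleton (c : Char) (l : List Char) (fuel : Nat) (acc : Nat)
    (h : l.length ≤ fuel) :
    PySem.Chars.count.go [c] fuel l acc = acc + l.count c := by
  induction l generalizing fuel acc with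
  | nil => cases fuel <;> simp [PySem.Chars.count.go]
  | cons hd t ih =>
    cases fuel with
    | zero => simp at h
    | succ f =>
      simp only [List.length_cons, Nat.add_le_add_iff_right] at h
      rw [PySem.Chars.count.go]
      by_cases hc : hd = c
      · subst hc
        simp [List.isPrefixOf, ih _ _ h]
        ring
      · have : List.isPrefixOf [c] (hd :: t) = false := by
          simp [List.isPrefixOf]; exact fun he => (hc he.symm).elim
        simp [this, ih _ _ h, hc]

theorem count_singleton (c : Char) (l : List Char) :
    PySem.Chars.count l [c] = l.count c := by
  simp [PySem.Chars.count, count_go_singleton]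

-- A's floor component is the count difference, regardless of basement/pos state
theorem solveAux_fst (l : List Char) (f b p : Int) :
    (solveAux l f b p).1 = f + (l.count '(' : Int) - (l.count ')' : Int) := by
  induction l generalizing f b p with
  | nil => simp [solveAux]
  | cons c t ih =>
    rw [solveAux_cons, ih]
    by_cases h1 : c = '(' <;> by_cases h2 : c = ')' <;>
      simp [h1, h2] <;> ring

-- once basement is set (to something ≠ -1) it never changes
theorem solveAux_snd_set (l : List Char) (f b p : Int) (hb : b ≠ -1) :
    (solveAux l f b p).2 = b := by
  induction l generalizing f b p with
  | nil => simp [solveAux]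
  | cons c t ih =>
    rw [solveAux_cons]
    by_cases h : (if c = '(' then f + 1 else if c = ')' then f - 1 else f) = -1 ∧ b = -1
    · exact absurd h.2 hb
    · rw [if_neg h]; exact ih _ _ _ hb

-- while basement is unset, A's scan agrees with B's early-break scan
theorem solveAux_snd_unset (l : List Char) (f p : Int) (hp : 1 ≤ p) :
    (solveAux l f (-1) p).2 = basementAux l f p := by
  induction l generalizing f p with
  | nil => simp [solveAux, basementAux]
  | cons c t ih =>
    rw [solveAux_cons, basementAux_cons]
    by_cases h : (if c = '(' then f + 1 else if c = ')' then f - 1 else f) = -1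
    · have e1 : (if (if c = '(' then f + 1 else if c = ')' then f - 1 else f) = -1 ∧ (-1 : Int) = -1
          then p else (-1 : Int)) = p := if_pos ⟨h, rfl⟩
      rw [e1, if_pos h]
      exact solveAux_snd_set t _ _ _ (by omega)
    · have e1 : (if (if c = '(' then f + 1 else if c = ')' then f - 1 else f) = -1 ∧ (-1 : Int) = -1
          then p else (-1 : Int)) = -1 := if_neg (fun hh => h hh.1)
      rw [e1, if_neg h]
      exact ih _ _ (by omega)

-- ===== VERDICT (by name: the statement is the Claim_ definition above) =====
theorem solve_spec : Claim_equal_solve := by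
  intro data _
  unfold Spec_solve solve solve_alt
  have h1 : PySem.Str.count data "(" = data.toList.count '(' := by
    rw [PySem.Str.count_eq, show "(".toList = ['('] from rfl, count_singleton]
  have h2 : PySem.Str.count data ")" = data.toList.count ')' := by
    rw [PySem.Str.count_eq, show ")".toList = [')'] from rfl, count_singleton]
  refine Prod.ext ?_ ?_
  · rw [solveAux_fst, h1, h2]; ring
  · exact solveAux_snd_unset data.toList 0 1 (by norm_num)
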